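-- pv_equiv track=rewrite | github.com/AmadoMiguel/Coding-problems | Python/December-2019/swapTwoLetters.py | swapTwoLetters
-- ===== SOURCE A (Python) =====
-- def swapTwoLetters(wordToSwapAsList, refWord, ptrw1, ptrw2, isSwappable):
--     if ptrw2 < len(wordToSwapAsList) and not isSwappable:
--         swappedWordAsList = wordToSwapAsList[:]
--         let1 = swappedWordAsList[ptrw1]
--         swappedWordAsList[ptrw1] = swappedWordAsList[ptrw2]
--         swappedWordAsList[ptrw2] = let1
--         joinedSwappedWord = "".join(swappedWordAsList)
--         if joinedSwappedWord == refWord: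
--             isSwappable = True
--         if ptrw2 + 1 < len(wordToSwapAsList):
--             ptrw2 += 1
--             isSwappable = swapTwoLetters(wordToSwapAsList, refWord, ptrw1, ptrw2, isSwappable)
--         else:
--             ptrw1 += 1
--             ptrw2 = ptrw1 + 1
--             isSwappable = swapTwoLetters(wordToSwapAsList, refWord, ptrw1, ptrw2, isSwappable)
--     return isSwappable
-- ===== SOURCE B (Python) =====
-- def swapTwoLetters(wordToSwapAsList, refWord, ptrw1, ptrw2, isSwappable):
--     n = len(wordToSwapAsList)
--     if isSwappable or ptrw2 >= n:
--         return isSwappable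
--     pairs = [(ptrw1, j) for j in range(ptrw2, n)] + \
--             [(i, j) for i in range(ptrw1 + 1, n) for j in range(i + 1, n)]
--     return any(
--         "".join(wordToSwapAsList[:i]) + wordToSwapAsList[j]
--         + "".join(wordToSwapAsList[i + 1:j]) + wordToSwapAsList[i]
--         + "".join(wordToSwapAsList[j + 1:]) == refWord
--         for (i, j) in pairs)
-- ===== Notes on version B (the rewrite author's own statement) =====
-- stated objective: alternative
-- what changed: A recursively scans pairs by mutating a copied list, re-joining it and threading a Boolean flag through the recursion; B enumerates the remaining pairs explicitly and returns any() of a slice-concatenation comparison per pair, with no recursion, no mutation and no flag threading.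
-- outside the precondition, e.g. on swapTwoLetters(['a', 'b'], 'ba', 1, 0, False): A returns True, B returns False; on swapTwoLetters(['a', 'b'], 'ba', -2, 1, False): A returns True, B returns True
import Mathlib
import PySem

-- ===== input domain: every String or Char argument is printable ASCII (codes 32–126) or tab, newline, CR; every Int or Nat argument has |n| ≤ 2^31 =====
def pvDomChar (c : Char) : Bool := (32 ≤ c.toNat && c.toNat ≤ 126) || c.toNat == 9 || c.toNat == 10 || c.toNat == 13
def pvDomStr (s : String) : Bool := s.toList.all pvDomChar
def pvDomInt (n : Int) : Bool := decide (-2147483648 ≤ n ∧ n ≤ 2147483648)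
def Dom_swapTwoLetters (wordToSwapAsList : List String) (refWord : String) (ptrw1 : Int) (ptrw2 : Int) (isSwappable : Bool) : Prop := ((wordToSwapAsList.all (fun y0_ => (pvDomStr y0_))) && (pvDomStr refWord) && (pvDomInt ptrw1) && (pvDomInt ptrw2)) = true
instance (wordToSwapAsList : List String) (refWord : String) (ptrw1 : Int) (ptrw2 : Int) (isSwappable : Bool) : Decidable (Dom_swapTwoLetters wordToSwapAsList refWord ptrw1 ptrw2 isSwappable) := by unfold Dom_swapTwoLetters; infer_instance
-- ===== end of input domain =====

-- B replaces A's recursive pair scan (copy, swap in place, re-join, thread a Boolean flag through the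
-- recursion) by a declarative `any` over the explicitly enumerated remaining pairs, building each
-- candidate word by slice concatenation; same cost class, different decomposition (objective: alternative).

-- ===== PORT A =====
-- A recurses over pairs (ptrw1, ptrw2); where Python raises IndexError (pointer outside the wrap
-- range) the port returns the current flag — those inputs are outside Pre_.
def swapTwoLetters (wordToSwapAsList : List String) (refWord : String) (ptrw1 : Int) (ptrw2 : Int) (isSwappable : Bool) : Bool :=
  if h : ptrw2 < (wordToSwapAsList.length : Int) ∧ isSwappable = false then
    match h1 : PySem.List.pyGet? wordToSwapAsList ptrw1, h2 : PySem.List.pyGet? wordToSwapAsList ptrw2 with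
    | some let1, some let2 =>
        let swappedWordAsList := PySem.List.pySetD (PySem.List.pySetD wordToSwapAsList ptrw1 let2) ptrw2 let1
        let joinedSwappedWord := PySem.Str.join "" swappedWordAsList
        let isSwappable2 := if joinedSwappedWord = refWord then true else isSwappable
        if ptrw2 + 1 < (wordToSwapAsList.length : Int) then
          swapTwoLetters wordToSwapAsList refWord ptrw1 (ptrw2 + 1) isSwappable2
        else
          swapTwoLetters wordToSwapAsList refWord (ptrw1 + 1) (ptrw1 + 1 + 1) isSwappable2
    | _, _ => isSwappable  -- Python raises IndexError here (excluded by Pre_)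
  else isSwappable
termination_by (((wordToSwapAsList.length : Int) - ptrw1).toNat, ((wordToSwapAsList.length : Int) - ptrw2).toNat)
decreasing_by
  · apply Prod.Lex.right
    omega
  · have hr : PySem.Raise.InRange wordToSwapAsList.length ptrw1 := by
      by_contra hc
      rw [← PySem.List.pyGet?_eq_none_iff] at hc
      rw [h1] at hc
      simp at hc
    obtain ⟨hrl, hrr⟩ := hr
    apply Prod.Lex.left
    omega

-- ===== PORT B =====
-- list indexing w[i]/w[j] is ported as pyGetD with default "" — exact whenever the index is in
-- range, which Pre_ guarantees for every generated pair.
def swapTwoLetters_alt (wordToSwapAsList : List String) (refWord : String) (ptrw1 : Int) (ptrw2 : Int) (isSwappable : Bool) : Bool :=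
  let n : Int := (wordToSwapAsList.length : Int)
  if isSwappable || n ≤ ptrw2 then isSwappable
  else
    let pairs := (PySem.List.pyRange ptrw2 n).map (fun j => (ptrw1, j)) ++
      (PySem.List.pyRange (ptrw1 + 1) n).flatMap (fun i =>
        (PySem.List.pyRange (i + 1) n).map (fun j => (i, j)))
    pairs.any (fun ij =>
      PySem.Str.join "" (PySem.List.slice wordToSwapAsList none (some ij.1)) ++
        PySem.List.pyGetD wordToSwapAsList ij.2 "" ++
        PySem.Str.join "" (PySem.List.slice wordToSwapAsList (some (ij.1 + 1)) (some ij.2)) ++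
        PySem.List.pyGetD wordToSwapAsList ij.1 "" ++
        PySem.Str.join "" (PySem.List.slice wordToSwapAsList (some (ij.2 + 1)) none) == refWord)

-- ===== PRECONDITION & SPEC =====
-- Pre_ excludes calls that enter the scanning branch with pointers outside the canonical recursion
-- protocol 0 ≤ ptrw1 < ptrw2: there A raises IndexError for pointers beyond the wrap range, and for
-- negative or inverted in-range pointers its value is an artefact of Python's negative-index
-- wraparound on a corner no caller of this recursive helper would specify.
def Pre_swapTwoLetters (wordToSwapAsList : List String) (refWord : String) (ptrw1 : Int) (ptrw2 : Int) (isSwappable : Bool) : Prop :=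
  isSwappable = true ∨ (wordToSwapAsList.length : Int) ≤ ptrw2 ∨
    (0 ≤ ptrw1 ∧ ptrw1 < ptrw2 ∧ ptrw2 < (wordToSwapAsList.length : Int))
instance (wordToSwapAsList : List String) (refWord : String) (ptrw1 : Int) (ptrw2 : Int) (isSwappable : Bool) : Decidable (Pre_swapTwoLetters wordToSwapAsList refWord ptrw1 ptrw2 isSwappable) := by unfold Pre_swapTwoLetters; infer_instance

def pvWitness_swapTwoLetters : List String × String × Int × Int × Bool := (["a", "b"], "ba", 0, 1, false)

def Spec_swapTwoLetters (wordToSwapAsList : List String) (refWord : String) (ptrw1 : Int) (ptrw2 : Int) (isSwappable : Bool) (out : Bool) : Prop := out = swapTwoLetters_alt wordToSwapAsList refWord ptrw1 ptrw2 isSwappable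
instance (wordToSwapAsList : List String) (refWord : String) (ptrw1 : Int) (ptrw2 : Int) (isSwappable : Bool) (out : Bool) : Decidable (Spec_swapTwoLetters wordToSwapAsList refWord ptrw1 ptrw2 isSwappable out) := by unfold Spec_swapTwoLetters; infer_instance

-- ===== CLAIM (what is proved, stated in full; the proofs are below) =====
def Claim_equal_swapTwoLetters : Prop := ∀ (wordToSwapAsList : List String) (refWord : String) (ptrw1 : Int) (ptrw2 : Int) (isSwappable : Bool), Dom_swapTwoLetters wordToSwapAsList refWord ptrw1 ptrw2 isSwappable → Pre_swapTwoLetters wordToSwapAsList refWord ptrw1 ptrw2 isSwappable → Spec_swapTwoLetters wordToSwapAsList refWord ptrw1 ptrw2 isSwappable (swapTwoLetters wordToSwapAsList refWord ptrw1 ptrw2 isSwappable)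

-- ===== LEMMAS AND PROOFS =====

-- B's candidate check for the pair (i, j), and B's remaining-pair list, as named helpers.
def pvCheck (w : List String) (ref : String) (i j : Int) : Bool :=
  PySem.Str.join "" (PySem.List.slice w none (some i)) ++
    PySem.List.pyGetD w j "" ++
    PySem.Str.join "" (PySem.List.slice w (some (i + 1)) (some j)) ++
    PySem.List.pyGetD w i "" ++
    PySem.Str.join "" (PySem.List.slice w (some (j + 1)) none) == ref

def pvPairs (w : List String) (p1 p2 : Int) : List (Int × Int) :=
  (PySem.List.pyRange p2 (w.length : Int)).map (fun j => (p1, j)) ++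
    (PySem.List.pyRange (p1 + 1) (w.length : Int)).flatMap (fun i =>
      (PySem.List.pyRange (i + 1) (w.length : Int)).map (fun j => (i, j)))

def pvAny (w : List String) (ref : String) (p1 p2 : Int) : Bool :=
  (pvPairs w p1 p2).any (fun ij => pvCheck w ref ij.1 ij.2)

theorem pvAlt_eq (w : List String) (ref : String) (p1 p2 : Int)
    (h2 : p2 < (w.length : Int)) :
    swapTwoLetters_alt w ref p1 p2 false = pvAny w ref p1 p2 := by
  simp [swapTwoLetters_alt, pvAny, pvPairs, pvCheck, not_le.mpr h2]

theorem pvPairs_rec (w : List String) (p1 p2 : Int) (h1 : p1 < p2) (h2 : p2 < (w.length : Int)) :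
    pvPairs w p1 p2 = (p1, p2) ::
      (if p2 + 1 < (w.length : Int) then pvPairs w p1 (p2 + 1) else pvPairs w (p1 + 1) (p1 + 1 + 1)) := by
  unfold pvPairs
  rw [PySem.List.pyRange_one_cons h2]
  split
  · simp
  · rename_i hge
    rw [PySem.List.pyRange_one_eq_nil (by omega : (w.length : Int) ≤ p2 + 1)]
    rw [PySem.List.pyRange_one_cons (by omega : p1 + 1 < (w.length : Int))]
    simp

theorem pvPairs_nil (w : List String) (p1 p2 : Int) (h2 : (w.length : Int) ≤ p2)
    (h3 : (w.length : Int) ≤ p1 + 1) : pvPairs w p1 p2 = [] := by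
  unfold pvPairs
  rw [PySem.List.pyRange_one_eq_nil h2, PySem.List.pyRange_one_eq_nil h3]
  simp

theorem pvJoin_nil_sep (l : List (List Char)) : PySem.Chars.join [] l = l.flatten := by
  induction l with
  | nil => rfl
  | cons x t ih =>
      cases t with
      | nil => simp [PySem.Chars.join, List.intercalate]
      | cons y t' =>
          simp only [PySem.Chars.join, List.intercalate] at *
          simp [List.intersperse] at *
          simp [ih]

theorem pvSwap_decomp (w : List String) (a b : Nat) (x y : String)
    (hab : a < b) (hb : b < w.length) :
    (w.set a x).set b y =
      w.take a ++ x :: ((w.drop (a + 1)).take (b - (a + 1)) ++ y :: w.drop (b + 1)) := by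
  have hset : (w.set a x).set b y = ((w.set a x).take b) ++ y :: ((w.set a x).drop (b + 1)) := by
    rw [List.set_eq_take_append_cons_drop]
    simp [hb]
  rw [hset, List.take_set, List.drop_set_of_lt (by omega)]
  have htk : (w.take b).set a x = (w.take b).take a ++ x :: (w.take b).drop (a + 1) := by
    rw [List.set_eq_take_append_cons_drop]
    simp
    omega
  rw [htk, List.take_take, List.drop_take]
  simp [Nat.min_eq_left (le_of_lt hab)]

theorem pvCheck_eq_swap (w : List String) (ref : String) (p1 p2 : Int)
    (h0 : 0 ≤ p1) (h1 : p1 < p2) (h2 : p2 < (w.length : Int)) :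
    pvCheck w ref p1 p2 =
      (PySem.Str.join "" (PySem.List.pySetD (PySem.List.pySetD w p1 (PySem.List.pyGetD w p2 ""))
        p2 (PySem.List.pyGetD w p1 "")) == ref) := by
  have h0' : 0 ≤ p2 := by omega
  set a := p1.toNat with ha
  set b := p2.toNat with hb
  have hab : a < b := by omega
  have hbl : b < w.length := by omega
  have key :
      PySem.Str.join "" (PySem.List.slice w none (some p1)) ++
        PySem.List.pyGetD w p2 "" ++
        PySem.Str.join "" (PySem.List.slice w (some (p1 + 1)) (some p2)) ++
        PySem.List.pyGetD w p1 "" ++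
        PySem.Str.join "" (PySem.List.slice w (some (p2 + 1)) none) =
      PySem.Str.join "" (PySem.List.pySetD (PySem.List.pySetD w p1 (PySem.List.pyGetD w p2 ""))
        p2 (PySem.List.pyGetD w p1 "")) := by
    apply String.toList_inj.mp
    rw [PySem.List.pySetD_of_nonneg _ _ h0]
    rw [PySem.List.pySetD_of_nonneg _ _ h0']
    rw [pvSwap_decomp w a b _ _ hab hbl]
    rw [PySem.List.slice_to w h0, PySem.List.slice_toNat w (by omega) h0',
        PySem.List.slice_from w (by omega : (0:Int) ≤ p2 + 1)]
    have e1 : (p1 + 1).toNat = a + 1 := by omega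
    have e2 : (p2 + 1).toNat = b + 1 := by omega
    rw [e1, e2]
    simp only [String.toList_append, PySem.Str.toList_join, List.map_append, List.map_cons,
      List.map_take, List.map_drop]
    simp only [← ha, ← hb]
    simp [pvJoin_nil_sep, List.flatten_append, List.append_assoc]
  rw [pvCheck, key]

theorem pvGetD_eq_of_some (w : List String) (i : Int) (v : String)
    (h : PySem.List.pyGet? w i = some v) : PySem.List.pyGetD w i "" = v := by
  simp [PySem.List.pyGetD, h]

theorem pvA_char (w : List String) (ref : String) :
    ∀ (p1 p2 : Int) (sw : Bool), 0 ≤ p1 → p1 < p2 → p2 < (w.length : Int) →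
      swapTwoLetters w ref p1 p2 sw = (sw || pvAny w ref p1 p2) := by
  intro p1 p2 sw
  induction p1, p2, sw using swapTwoLetters.induct (wordToSwapAsList := w) (refWord := ref) with
  | case1 p1 p2 sw hg let1 let2 hg1 hg2 swl jw sw2 hlt ih =>
      intro h0 h1 h2
      obtain ⟨-, hswf⟩ := hg
      subst hswf
      have hc : sw2 = pvCheck w ref p1 p2 := by
        have hc0 := pvCheck_eq_swap w ref p1 p2 h0 h1 h2
        rw [pvGetD_eq_of_some w p1 let1 hg1, pvGetD_eq_of_some w p2 let2 hg2] at hc0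
        rw [hc0]
        simp only [sw2, jw, swl]
        by_cases hj : PySem.Str.join "" (PySem.List.pySetD (PySem.List.pySetD w p1 let2) p2 let1) = ref
        · simp [hj]
        · simp [hj]
      have hrec : pvAny w ref p1 p2 = (pvCheck w ref p1 p2 || pvAny w ref p1 (p2 + 1)) := by
        rw [pvAny, pvPairs_rec w p1 p2 h1 h2, if_pos hlt]
        simp [pvAny]
      rw [swapTwoLetters]
      rw [dif_pos ⟨h2, rfl⟩]
      split
      case _ l1 l2 he1 he2 =>
        rw [hg1] at he1
        rw [hg2] at he2
        injection he1 with he1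
        injection he2 with he2
        subst he1
        subst he2
        rw [if_pos hlt]
        have hcall : (if PySem.Str.join "" (PySem.List.pySetD (PySem.List.pySetD w p1 let2) p2 let1) = ref
            then true else false) = sw2 := by
          simp only [sw2, jw, swl]
          by_cases hj : PySem.Str.join "" (PySem.List.pySetD (PySem.List.pySetD w p1 let2) p2 let1) = ref
          · simp [hj]
          · simp [hj]
        rw [hcall, ih (by omega) (by omega) (by omega), hrec, hc]
        cases pvCheck w ref p1 p2 <;> simp
      next hno =>
        exact (hno let1 let2 hg1 hg2).elim
  | case2 p1 p2 sw hg let1 let2 hg1 hg2 swl jw sw2 hge ih =>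
      intro h0 h1 h2
      obtain ⟨-, hswf⟩ := hg
      subst hswf
      have hc : sw2 = pvCheck w ref p1 p2 := by
        have hc0 := pvCheck_eq_swap w ref p1 p2 h0 h1 h2
        rw [pvGetD_eq_of_some w p1 let1 hg1, pvGetD_eq_of_some w p2 let2 hg2] at hc0
        rw [hc0]
        simp only [sw2, jw, swl]
        by_cases hj : PySem.Str.join "" (PySem.List.pySetD (PySem.List.pySetD w p1 let2) p2 let1) = ref
        · simp [hj]
        · simp [hj]
      have hrec : pvAny w ref p1 p2 = (pvCheck w ref p1 p2 || pvAny w ref (p1 + 1) (p1 + 1 + 1)) := by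
        rw [pvAny, pvPairs_rec w p1 p2 h1 h2, if_neg hge]
        simp [pvAny]
      rw [swapTwoLetters]
      rw [dif_pos ⟨h2, rfl⟩]
      split
      case _ l1 l2 he1 he2 =>
        rw [hg1] at he1
        rw [hg2] at he2
        injection he1 with he1
        injection he2 with he2
        subst he1
        subst he2
        rw [if_neg hge]
        have hcall : (if PySem.Str.join "" (PySem.List.pySetD (PySem.List.pySetD w p1 let2) p2 let1) = ref
            then true else false) = sw2 := by
          simp only [sw2, jw, swl]
          by_cases hj : PySem.Str.join "" (PySem.List.pySetD (PySem.List.pySetD w p1 let2) p2 let1) = ref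
          · simp [hj]
          · simp [hj]
        rw [hcall]
        by_cases hlt2 : p1 + 1 + 1 < (w.length : Int)
        · rw [ih (by omega) (by omega) hlt2, hrec, hc]
          cases pvCheck w ref p1 p2 <;> simp
        · have hnil : pvAny w ref (p1 + 1) (p1 + 1 + 1) = false := by
            rw [pvAny, pvPairs_nil w (p1 + 1) (p1 + 1 + 1) (by omega) (by omega)]
            rfl
          rw [swapTwoLetters]
          rw [dif_neg (by intro hcontra; exact hlt2 hcontra.1)]
          rw [hrec, hnil, hc]
          cases pvCheck w ref p1 p2 <;> simp
      next hno =>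
        exact (hno let1 let2 hg1 hg2).elim
  | case3 p1 p2 sw hg hFalse =>
      intro h0 h1 h2
      have e1 : ∃ v, PySem.List.pyGet? w p1 = some v := by
        cases hv : PySem.List.pyGet? w p1 with
        | none =>
            rw [PySem.List.pyGet?_eq_none_iff] at hv
            exact absurd ⟨by omega, by omega⟩ hv
        | some v => exact ⟨v, rfl⟩
      have e2 : ∃ v, PySem.List.pyGet? w p2 = some v := by
        cases hv : PySem.List.pyGet? w p2 with
        | none =>
            rw [PySem.List.pyGet?_eq_none_iff] at hv
            exact absurd ⟨by omega, by omega⟩ hv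
        | some v => exact ⟨v, rfl⟩
      obtain ⟨v1, e1⟩ := e1
      obtain ⟨v2, e2⟩ := e2
      exact (hFalse v1 v2 e1 e2).elim
  | case4 p1 p2 sw hng =>
      intro h0 h1 h2
      have hsw : sw = true := by
        cases sw
        · exact absurd ⟨h2, rfl⟩ hng
        · rfl
      subst hsw
      rw [swapTwoLetters, dif_neg hng]
      simp

-- ===== VERDICT (by name: the statement is the Claim_ definition above) =====
theorem swapTwoLetters_spec : Claim_equal_swapTwoLetters := by
  intro w ref p1 p2 sw _hdom hpre
  show swapTwoLetters w ref p1 p2 sw = swapTwoLetters_alt w ref p1 p2 sw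
  rcases hpre with hsw | hge | ⟨h0, h1, h2⟩
  · subst hsw
    rw [swapTwoLetters]
    simp [swapTwoLetters_alt]
  · rw [swapTwoLetters]
    simp [swapTwoLetters_alt, not_lt.mpr hge, hge]
  · cases sw with
    | true =>
        rw [swapTwoLetters]
        simp [swapTwoLetters_alt]
    | false =>
        rw [pvA_char w ref p1 p2 false h0 h1 h2, pvAlt_eq w ref p1 p2 h2]
        simp
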